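-- pv_equiv track=rewrite | github.com/whirgod/AdventOfCode | 2024/day02/part2.py | is_increasing_and_safe
-- ===== SOURCE A (Python) =====
-- def is_increasing_and_safe(prev, remaining_report, skipps_left = 0):
--     if skipps_left < 0:
--         return False
--     if len(remaining_report) <= skipps_left:
--         return True
--
--     level = remaining_report[0]
--     return level - prev >= 1 and level - prev <= 3 and is_increasing_and_safe(level, remaining_report[1:], skipps_left) \
--         or is_increasing_and_safe(prev, remaining_report[1:], skipps_left - 1)
-- ===== SOURCE B (Python) =====
-- def is_increasing_and_safe(prev, remaining_report, skipps_left=0):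
--     # Forward DP over reachable (last_kept_value, skips_used) states instead of
--     # branching recursion: polynomial in len(remaining_report) instead of exponential.
--     states = {(prev, 0)}
--     for level in remaining_report:
--         nxt = set()
--         for (p, u) in states:
--             if u + 1 <= skipps_left:        # skip this level (prune states over budget)
--                 nxt.add((p, u + 1))
--             if 1 <= level - p <= 3:         # keep this level
--                 nxt.add((level, u))
--         states = nxt
--     return any(u <= skipps_left for (p, u) in states)
-- ===== Notes on version B (the rewrite author's own statement) =====
-- stated objective: faster
-- what changed: Replaced the exponential take/skip branching recursion by a forward dynamic program over the set of reachable (last-kept-value, skips-used) states, pruning states over the skip budget.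
import Mathlib
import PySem

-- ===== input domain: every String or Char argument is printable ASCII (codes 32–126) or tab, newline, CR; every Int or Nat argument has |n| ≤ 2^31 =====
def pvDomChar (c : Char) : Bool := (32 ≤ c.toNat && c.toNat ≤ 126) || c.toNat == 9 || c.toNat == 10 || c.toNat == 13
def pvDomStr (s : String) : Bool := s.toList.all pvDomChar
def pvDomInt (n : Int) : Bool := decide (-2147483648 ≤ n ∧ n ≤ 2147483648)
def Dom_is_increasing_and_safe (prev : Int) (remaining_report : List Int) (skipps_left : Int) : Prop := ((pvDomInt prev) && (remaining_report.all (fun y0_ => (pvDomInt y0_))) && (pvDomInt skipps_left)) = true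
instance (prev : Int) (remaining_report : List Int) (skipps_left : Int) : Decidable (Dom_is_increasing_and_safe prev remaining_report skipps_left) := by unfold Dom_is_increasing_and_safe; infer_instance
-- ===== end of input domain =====

-- B replaces A's exponential take/skip branching recursion by a forward DP over the
-- set of reachable (last-kept-value, skips-used) states; same return value everywhere.

-- ===== PORT A =====
def is_increasing_and_safe (prev : Int) (remaining_report : List Int) (skipps_left : Int) : Bool :=
  if skipps_left < 0 then false
  else if (remaining_report.length : Int) ≤ skipps_left then true
  else
    match remaining_report with
    | [] => false  -- unreachable: here length 0 ≤ skipps_left is false, so skipps_left < 0, caught above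
    | level :: rest =>
      (decide (level - prev ≥ 1) && decide (level - prev ≤ 3) &&
        is_increasing_and_safe level rest skipps_left)
      || is_increasing_and_safe prev rest (skipps_left - 1)

-- ===== PORT B =====
-- one pass of B's inner loop: all successor states of the states in s on reading `level`
def pvStep (k level : Int) (s : PySem.Set (Int × Int)) : PySem.Set (Int × Int) :=
  s.foldl (fun nxt pu =>
    let n1 := if pu.2 + 1 ≤ k then PySem.Set.add nxt (pu.1, pu.2 + 1) else nxt
    if 1 ≤ level - pu.1 && level - pu.1 ≤ 3 then PySem.Set.add n1 (level, pu.2) else n1)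
    PySem.Set.empty

def is_increasing_and_safe_alt (prev : Int) (remaining_report : List Int) (skipps_left : Int) : Bool :=
  let states := remaining_report.foldl (fun s level => pvStep skipps_left level s)
                  (PySem.Set.ofList [(prev, 0)])
  states.any (fun pu => decide (pu.2 ≤ skipps_left))

-- ===== PRECONDITION & SPEC =====
def Spec_is_increasing_and_safe (prev : Int) (remaining_report : List Int) (skipps_left : Int) (out : Bool) : Prop := out = is_increasing_and_safe_alt prev remaining_report skipps_left
instance (prev : Int) (remaining_report : List Int) (skipps_left : Int) (out : Bool) : Decidable (Spec_is_increasing_and_safe prev remaining_report skipps_left out) := by unfold Spec_is_increasing_and_safe; infer_instance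

-- ===== CLAIM (what is proved, stated in full; the proofs are below) =====
def Claim_equal_is_increasing_and_safe : Prop := ∀ (prev : Int) (remaining_report : List Int) (skipps_left : Int), Dom_is_increasing_and_safe prev remaining_report skipps_left → Spec_is_increasing_and_safe prev remaining_report skipps_left (is_increasing_and_safe prev remaining_report skipps_left)

-- ===== LEMMAS AND PROOFS =====

-- "from prev, the whole list can be consumed keeping a 1..3-increasing chain with u skips"
inductive pvValid : Int → List Int → Nat → Prop
  | nil (p : Int) : pvValid p [] 0
  | take {p l : Int} {r : List Int} {u : Nat} :
      1 ≤ l - p → l - p ≤ 3 → pvValid l r u → pvValid p (l :: r) u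
  | skip {p l : Int} {r : List Int} {u : Nat} :
      pvValid p r u → pvValid p (l :: r) (u + 1)

lemma pvValid_nil_iff (p : Int) (u : Nat) : pvValid p [] u ↔ u = 0 := by
  constructor
  · intro h; cases h; rfl
  · rintro rfl; exact pvValid.nil p

lemma pvValid_skipAll : ∀ (r : List Int) (p : Int), pvValid p r r.length := by
  intro r; induction r with
  | nil => intro p; exact pvValid.nil p
  | cons l rest ih => intro p; exact pvValid.skip (ih p)

lemma A_char : ∀ (r : List Int) (p k : Int),
    is_increasing_and_safe p r k = true ↔ ∃ u : Nat, pvValid p r u ∧ (u : Int) ≤ k := by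
  intro r
  induction r with
  | nil =>
    intro p k
    by_cases hk : k < 0
    · have hA : is_increasing_and_safe p [] k = false := by
        unfold is_increasing_and_safe; rw [if_pos hk]
      rw [hA]
      constructor
      · intro h; exact absurd h (by simp)
      · rintro ⟨u, -, hu⟩; exfalso; omega
    · have hA : is_increasing_and_safe p [] k = true := by
        unfold is_increasing_and_safe
        rw [if_neg hk, if_pos (by simp; omega)]
      rw [hA]
      exact iff_of_true rfl ⟨0, pvValid.nil p, by omega⟩
  | cons l rest ih =>
    intro p k
    by_cases hk : k < 0
    · simp only [is_increasing_and_safe, if_pos hk]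
      constructor
      · intro h; cases h
      · rintro ⟨u, -, hu⟩; omega
    · by_cases hlen : ((l :: rest).length : Int) ≤ k
      · have hA : is_increasing_and_safe p (l :: rest) k = true := by
          unfold is_increasing_and_safe; rw [if_neg hk, if_pos hlen]
        rw [hA]
        exact iff_of_true rfl ⟨(l :: rest).length, pvValid_skipAll _ p, hlen⟩
      · simp only [is_increasing_and_safe, if_neg hk, if_neg hlen, Bool.or_eq_true,
          Bool.and_eq_true, decide_eq_true_eq, ih]
        constructor
        · rintro (⟨⟨h1, h2⟩, u, hv, hu⟩ | ⟨u, hv, hu⟩)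
          · exact ⟨u, pvValid.take (by omega) h2 hv, hu⟩
          · exact ⟨u + 1, pvValid.skip hv, by push_cast; omega⟩
        · rintro ⟨u, hv, hu⟩
          cases hv with
          | take h1 h2 hv' => exact Or.inl ⟨⟨by omega, h2⟩, _, hv', hu⟩
          | skip hv' => exact Or.inr ⟨_, hv', by push_cast at hu ⊢; omega⟩

-- membership produced by one iteration of B's inner loop body
lemma pvMemBody (k level : Int) (acc : PySem.Set (Int × Int)) (x q : Int × Int) :
    (q ∈ (let n1 := if x.2 + 1 ≤ k then PySem.Set.add acc (x.1, x.2 + 1) else acc;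
          if 1 ≤ level - x.1 && level - x.1 ≤ 3 then PySem.Set.add n1 (level, x.2) else n1))
    ↔ q ∈ acc ∨ (q = (x.1, x.2 + 1) ∧ x.2 + 1 ≤ k) ∨
        (q = (level, x.2) ∧ 1 ≤ level - x.1 ∧ level - x.1 ≤ 3) := by
  simp only [Bool.and_eq_true, decide_eq_true_eq]
  split_ifs with h2 h1 h1 <;> (try simp only [PySem.Set.mem_add]) <;> tauto

lemma mem_pvStep_fold : ∀ (l : List (Int × Int)) (k level : Int)
    (acc : PySem.Set (Int × Int)) (q : Int × Int),
    q ∈ l.foldl (fun nxt pu =>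
      let n1 := if pu.2 + 1 ≤ k then PySem.Set.add nxt (pu.1, pu.2 + 1) else nxt
      if 1 ≤ level - pu.1 && level - pu.1 ≤ 3 then PySem.Set.add n1 (level, pu.2) else n1) acc
    ↔ q ∈ acc ∨ ∃ pu ∈ l,
        (q = (pu.1, pu.2 + 1) ∧ pu.2 + 1 ≤ k) ∨
        (q = (level, pu.2) ∧ 1 ≤ level - pu.1 ∧ level - pu.1 ≤ 3) := by
  intro l
  induction l with
  | nil => simp
  | cons x xs ih =>
    intro k level acc q
    simp only [List.foldl_cons, ih, pvMemBody, List.mem_cons]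
    constructor
    · rintro ((h | h | h) | ⟨pu, hpu, hp⟩)
      · exact Or.inl h
      · exact Or.inr ⟨x, Or.inl rfl, Or.inl h⟩
      · exact Or.inr ⟨x, Or.inl rfl, Or.inr h⟩
      · exact Or.inr ⟨pu, Or.inr hpu, hp⟩
    · rintro (h | ⟨pu, rfl | hpu, hp⟩)
      · exact Or.inl (Or.inl h)
      · exact Or.inl (Or.inr hp)
      · exact Or.inr ⟨pu, hpu, hp⟩

lemma mem_pvStep (k level : Int) (s : PySem.Set (Int × Int)) (q : Int × Int) :
    q ∈ pvStep k level s ↔ ∃ pu ∈ s,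
        (q = (pu.1, pu.2 + 1) ∧ pu.2 + 1 ≤ k) ∨
        (q = (level, pu.2) ∧ 1 ≤ level - pu.1 ∧ level - pu.1 ≤ 3) := by
  unfold pvStep
  rw [mem_pvStep_fold]
  simp [PySem.Set.empty]

-- "some state of s can finish rem within budget k"
def pvG (s : List (Int × Int)) (rem : List Int) (k : Int) : Prop :=
  ∃ pu ∈ s, ∃ v : Nat, pvValid pu.1 rem v ∧ pu.2 + v ≤ k

lemma pvG_step (k level : Int) (s : PySem.Set (Int × Int)) (rem : List Int) :
    pvG (pvStep k level s) rem k ↔ pvG s (level :: rem) k := by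
  constructor
  · rintro ⟨q, hq, v, hv, hbound⟩
    rw [mem_pvStep] at hq
    rcases hq with ⟨pu, hpu, ⟨rfl, _⟩ | ⟨rfl, h1, h2⟩⟩
    · exact ⟨pu, hpu, v + 1, pvValid.skip hv, by push_cast; push_cast at hbound; omega⟩
    · exact ⟨pu, hpu, v, pvValid.take h1 h2 hv, hbound⟩
  · rintro ⟨pu, hpu, w, hw, hbound⟩
    cases hw with
    | take h1 h2 hv =>
      refine ⟨(level, pu.2), ?_, _, hv, hbound⟩
      rw [mem_pvStep]
      exact ⟨pu, hpu, Or.inr ⟨rfl, h1, h2⟩⟩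
    | skip hv =>
      rename_i v
      refine ⟨(pu.1, pu.2 + 1), ?_, v, hv, by push_cast at hbound ⊢; omega⟩
      rw [mem_pvStep]
      exact ⟨pu, hpu, Or.inl ⟨rfl, by push_cast at hbound; omega⟩⟩

lemma pvG_fold : ∀ (rem : List Int) (s : PySem.Set (Int × Int)) (k : Int),
    (∃ pu ∈ rem.foldl (fun s level => pvStep k level s) s, pu.2 ≤ k) ↔ pvG s rem k := by
  intro rem
  induction rem with
  | nil =>
    intro s k
    unfold pvG
    constructor
    · rintro ⟨pu, hpu, h⟩; exact ⟨pu, hpu, 0, pvValid.nil _, by omega⟩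
    · rintro ⟨pu, hpu, v, hv, h⟩
      rw [pvValid_nil_iff] at hv; subst hv
      exact ⟨pu, hpu, by simpa using h⟩
  | cons l rest ih =>
    intro s k
    rw [List.foldl_cons, ih, pvG_step]

lemma B_char (p : Int) (r : List Int) (k : Int) :
    is_increasing_and_safe_alt p r k = true ↔ ∃ u : Nat, pvValid p r u ∧ (u : Int) ≤ k := by
  unfold is_increasing_and_safe_alt
  simp only [List.any_eq_true, decide_eq_true_eq]
  rw [pvG_fold]
  unfold pvG
  constructor
  · rintro ⟨pu, hpu, v, hv, hb⟩
    simp only [PySem.Set.ofList] at hpu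
    rcases List.mem_singleton.mp (by simpa [PySem.Set.ofList_eq_foldl] using hpu) with rfl
    exact ⟨v, hv, by simpa using hb⟩
  · rintro ⟨u, hv, hu⟩
    refine ⟨(p, 0), ?_, u, hv, by simpa using hu⟩
    simp [PySem.Set.ofList_eq_foldl, PySem.Set.add]

-- ===== VERDICT (by name: the statement is the Claim_ definition above) =====
theorem is_increasing_and_safe_spec : Claim_equal_is_increasing_and_safe := by
  intro prev remaining_report skipps_left _
  unfold Spec_is_increasing_and_safe
  have hA := A_char remaining_report prev skipps_left
  have hB := B_char prev remaining_report skipps_left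
  cases hEq : is_increasing_and_safe prev remaining_report skipps_left
  · cases hEq' : is_increasing_and_safe_alt prev remaining_report skipps_left
    · rfl
    · exact absurd (hA.mpr (hB.mp hEq')) (by simp [hEq])
  · exact (hB.mpr (hA.mp hEq)).symm
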